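-- pv_equiv track=rewrite | github.com/DisThorC/INDONESIAN-SIGN-LANGUEAGE-detector-using-YOLO12-increase-Boost-FPS | src/yolo12/utils/tracker.py | _vote_cls
-- ===== SOURCE A (Python) =====
-- from typing import Deque, Dict, List, Optional, Tuple
--
-- def _vote_cls(hist: Deque[int]) -> int:
--     # Majority vote; on ties keep most recent
--     if not hist:
--         return 0
--     counts: Dict[int, int] = {}
--     for c in hist:
--         counts[c] = counts.get(c, 0) + 1
--     max_cnt = max(counts.values())
--     candidates = [c for c, v in counts.items() if v == max_cnt]
--     # pick most recent among candidates
--     for c in reversed(hist):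
--         if c in candidates:
--             return c
--     return hist[-1]
-- ===== SOURCE B (Python) =====
-- def _vote_cls(hist):
--     # Single streaming pass: running counts plus a running champion.
--     # '>=' hands the champion to the latest class reaching the current best
--     # count, which is exactly "majority vote, ties to most recent".
--     best = 0
--     best_cnt = 0
--     counts = {}
--     for c in hist:
--         n = counts.get(c, 0) + 1
--         counts[c] = n
--         if n >= best_cnt:
--             best, best_cnt = c, n
--     return best
-- ===== Notes on version B (the rewrite author's own statement) =====
-- stated objective: alternative
-- what changed: A builds the full count dict, then takes max of its values, builds a candidate list, and does a reverse scan; B makes one streaming pass maintaining running counts and a running champion (best, best_cnt) updated with >=, so the latest class reaching the current best count wins, eliminating the max-of-values pass, the candidate list and the reverse scan.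
import Mathlib
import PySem

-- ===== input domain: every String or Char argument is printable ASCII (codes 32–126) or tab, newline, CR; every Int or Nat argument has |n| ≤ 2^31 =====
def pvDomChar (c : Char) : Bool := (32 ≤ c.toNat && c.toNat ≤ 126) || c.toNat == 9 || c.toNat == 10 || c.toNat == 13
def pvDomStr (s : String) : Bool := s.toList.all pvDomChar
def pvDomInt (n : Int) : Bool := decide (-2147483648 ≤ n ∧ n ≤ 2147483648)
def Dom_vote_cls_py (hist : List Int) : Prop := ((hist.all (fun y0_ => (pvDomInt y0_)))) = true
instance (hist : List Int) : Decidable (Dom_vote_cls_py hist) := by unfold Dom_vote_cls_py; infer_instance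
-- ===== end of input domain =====

-- B replaces A's three passes (count dict, max-of-values + candidate list, reverse scan)
-- by one streaming pass keeping a running champion; objective: alternative single-pass structure.

-- ===== PORT A =====
-- A's locals (counts, max_cnt, candidates) become one helper each, computed exactly as A computes them.
def pvA_counts (hist : List Int) : PySem.Dict Int Int :=
  hist.foldl (fun d c => d.insert c (d.getD c 0 + 1)) PySem.Dict.empty

def pvA_max_cnt (hist : List Int) : Int :=
  match PySem.List.max? (pvA_counts hist).values (fun v => v) with
  | some m => m
  | none => 0  -- unreachable: used only with hist ≠ [], so counts.values ≠ []

def pvA_candidates (hist : List Int) : List Int :=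
  ((pvA_counts hist).items.filter (fun kv => kv.2 == pvA_max_cnt hist)).map (fun kv => kv.1)

def vote_cls_py (hist : List Int) : Int :=
  if hist = [] then 0
  else
    match hist.reverse.find? (fun c => (pvA_candidates hist).contains c) with
    | some c => c
    | none => (PySem.List.pyGet? hist (-1)).getD 0  -- hist[-1]; hist ≠ [] here, so exact

-- ===== PORT B =====
def vote_cls_py_alt (hist : List Int) : Int :=
  (hist.foldl
    (fun s c =>
      let n := s.2.2.getD c 0 + 1
      let counts := s.2.2.insert c n
      if s.2.1 ≤ n then (c, n, counts) else (s.1, s.2.1, counts))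
    ((0 : Int), (0 : Int), (PySem.Dict.empty : PySem.Dict Int Int))).1

-- ===== PRECONDITION & SPEC =====
def Spec_vote_cls_py (hist : List Int) (out : Int) : Prop := out = vote_cls_py_alt hist
instance (hist : List Int) (out : Int) : Decidable (Spec_vote_cls_py hist out) := by unfold Spec_vote_cls_py; infer_instance

-- ===== CLAIM (what is proved, stated in full; the proofs are below) =====
def Claim_equal_vote_cls_py : Prop := ∀ (hist : List Int), Dom_vote_cls_py hist → Spec_vote_cls_py hist (vote_cls_py hist)

-- ===== LEMMAS AND PROOFS =====

-- the maximum count occurring in p (0 for the empty list)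
def pvMaxCnt (p : List Int) : Int := (p.map (fun x => (p.count x : Int))).foldl max 0

-- the canonical result: last element of p whose count is maximal
def pvPick (p : List Int) : Int :=
  (p.reverse.find? (fun c => decide ((p.count c : Int) = pvMaxCnt p))).getD 0

theorem pv_find?_congr_mem {α : Type} {l : List α} {f g : α → Bool}
    (h : ∀ x ∈ l, f x = g x) : l.find? f = l.find? g := by
  induction l with
  | nil => rfl
  | cons a t ih =>
    simp only [List.find?_cons, h a (List.mem_cons_self)]
    cases g a with
    | true => rfl
    | false => exact ih (fun x hx => h x (List.mem_cons_of_mem _ hx))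

theorem pvMaxCnt_nonneg (p : List Int) : 0 ≤ pvMaxCnt p := by
  have := PySem.List.le_foldl_max_int p (fun x => (p.count x : Int)) 0
  simpa [pvMaxCnt, List.foldl_map] using this.1

theorem pvMaxCnt_ge (p : List Int) {x : Int} (hx : x ∈ p) :
    (p.count x : Int) ≤ pvMaxCnt p := by
  have := PySem.List.le_foldl_max_int p (fun x => (p.count x : Int)) 0
  simpa [pvMaxCnt, List.foldl_map] using this.2 x hx

theorem pvMaxCnt_mem (p : List Int) (hp : p ≠ []) :
    ∃ x ∈ p, (p.count x : Int) = pvMaxCnt p := by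
  rcases PySem.List.foldl_max_mem (p.map (fun x => (p.count x : Int))) 0 with h0 | hmem
  · exfalso
    obtain ⟨a, t, rfl⟩ := List.exists_cons_of_ne_nil hp
    have ha : a ∈ a :: t := List.mem_cons_self
    have h1 : 0 < (a :: t).count a := List.count_pos_iff.mpr ha
    have h2 := pvMaxCnt_ge (a :: t) ha
    have h3 : pvMaxCnt (a :: t) = 0 := h0
    rw [h3] at h2
    omega
  · rw [List.mem_map] at hmem
    obtain ⟨x, hx, he⟩ := hmem
    exact ⟨x, hx, he⟩

theorem pv_count_append (p : List Int) (c x : Int) :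
    ((p ++ [c]).count x : Int) = (p.count x : Int) + (if c = x then 1 else 0) := by
  rw [List.count_append, List.count_singleton]
  by_cases h : c = x
  · simp [h]
  · simp [h]

theorem pv_count_snoc_self (p : List Int) (c : Int) :
    ((p ++ [c]).count c : Int) = (p.count c : Int) + 1 := by
  rw [pv_count_append, if_pos rfl]

theorem pvMaxCnt_append (p : List Int) (c : Int) :
    pvMaxCnt (p ++ [c]) = max (pvMaxCnt p) ((p.count c : Int) + 1) := by
  apply le_antisymm
  · rcases PySem.List.foldl_max_mem ((p ++ [c]).map (fun x => ((p ++ [c]).count x : Int))) 0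
      with h0 | hmem
    · have h00 : pvMaxCnt (p ++ [c]) = 0 := h0
      rw [h00]
      have := pvMaxCnt_nonneg p
      omega
    · have hmem' : pvMaxCnt (p ++ [c]) ∈ (p ++ [c]).map (fun x => ((p ++ [c]).count x : Int)) := hmem
      rw [List.mem_map] at hmem'
      obtain ⟨x, hx, he⟩ := hmem'
      by_cases hxc : x = c
      · rw [← he, hxc, pv_count_snoc_self]
        omega
      · have hxp : x ∈ p := by
          rcases List.mem_append.mp hx with h | h
          · exact h
          · simp at h; exact absurd h hxc
        have h1 := pv_count_append p c x
        have h2 := pvMaxCnt_ge p hxp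
        rw [← he, h1]
        rw [if_neg (fun h => hxc h.symm)]
        omega
  · have hc : c ∈ p ++ [c] := by simp
    have h1 := pvMaxCnt_ge (p ++ [c]) hc
    rw [pv_count_snoc_self] at h1
    have h3 : pvMaxCnt p ≤ pvMaxCnt (p ++ [c]) := by
      by_cases hp : p = []
      · subst hp
        have h0 := pvMaxCnt_nonneg ([] ++ [c])
        simp only [pvMaxCnt, List.map_nil, List.foldl_nil]
        exact h0
      · obtain ⟨x, hx, he⟩ := pvMaxCnt_mem p hp
        have hx' : x ∈ p ++ [c] := List.mem_append.mpr (Or.inl hx)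
        have h4 := pvMaxCnt_ge (p ++ [c]) hx'
        have h5 := pv_count_append p c x
        have h6 : (p.count x : Int) ≤ ((p ++ [c]).count x : Int) := by
          rw [h5]; by_cases h : c = x <;> simp [h]
        omega
    omega

-- counter over a snoc, in insert form (the form both ports' loop bodies use)
theorem pv_counter_snoc (p : List Int) (c : Int) :
    PySem.Dict.counter (p ++ [c])
      = (PySem.Dict.counter p).insert c ((PySem.Dict.counter p).getD c 0 + 1) := by
  rw [← PySem.Dict.foldl_insert_getD_add_one_eq_counter (p ++ [c]), List.foldl_append,
    PySem.Dict.foldl_insert_getD_add_one_eq_counter p]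
  simp [List.foldl_cons, List.foldl_nil]

-- the streaming fold of B computes (pvPick, pvMaxCnt, counter)
theorem pvB_state (p : List Int) :
    p.foldl
      (fun s c =>
        let n := s.2.2.getD c 0 + 1
        let counts := s.2.2.insert c n
        if s.2.1 ≤ n then (c, n, counts) else (s.1, s.2.1, counts))
      ((0 : Int), (0 : Int), (PySem.Dict.empty : PySem.Dict Int Int))
    = (pvPick p, pvMaxCnt p, PySem.Dict.counter p) := by
  induction p using List.reverseRecOn with
  | nil => rfl
  | append_singleton p c ih =>
    rw [List.foldl_append, ih]
    simp only [List.foldl_cons, List.foldl_nil]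
    have hn : (PySem.Dict.counter p).getD c 0 + 1 = (p.count c : Int) + 1 := by
      rw [PySem.Dict.getD_counter]
    have hcnt := pv_counter_snoc p c
    have hrev : (p ++ [c]).reverse = c :: p.reverse := by simp
    have hcc := pv_count_snoc_self p c
    by_cases hle : pvMaxCnt p ≤ (p.count c : Int) + 1
    · rw [hn, if_pos hle]
      have hM : pvMaxCnt (p ++ [c]) = (p.count c : Int) + 1 := by
        rw [pvMaxCnt_append]; omega
      have hpick : pvPick (p ++ [c]) = c := by
        unfold pvPick
        rw [hrev, List.find?_cons]
        have : decide (((p ++ [c]).count c : Int) = pvMaxCnt (p ++ [c])) = true := by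
          rw [hcc, hM]; simp
        rw [this]
        rfl
      rw [hpick, hM, hcnt, hn]
    · rw [hn, if_neg hle]
      have hlt : (p.count c : Int) + 1 < pvMaxCnt p := by omega
      have hM : pvMaxCnt (p ++ [c]) = pvMaxCnt p := by
        rw [pvMaxCnt_append]; omega
      have hpick : pvPick (p ++ [c]) = pvPick p := by
        unfold pvPick
        rw [hrev, List.find?_cons]
        have hfc : decide (((p ++ [c]).count c : Int) = pvMaxCnt (p ++ [c])) = false := by
          rw [hcc, hM]; simp; omega
        rw [hfc]
        have hcongr : p.reverse.find?
            (fun x => decide (((p ++ [c]).count x : Int) = pvMaxCnt (p ++ [c])))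
            = p.reverse.find? (fun x => decide ((p.count x : Int) = pvMaxCnt p)) := by
          apply pv_find?_congr_mem
          intro x hx
          by_cases hxc : x = c
          · have h1 : ¬ (((p ++ [c]).count x : Int) = pvMaxCnt (p ++ [c])) := by
              rw [hxc, hcc, hM]; omega
            have h2 : ¬ ((p.count x : Int) = pvMaxCnt p) := by rw [hxc]; omega
            show decide (((p ++ [c]).count x : Int) = pvMaxCnt (p ++ [c]))
              = decide ((p.count x : Int) = pvMaxCnt p)
            rw [decide_eq_false h1, decide_eq_false h2]
          · have h1 : ((p ++ [c]).count x : Int) = (p.count x : Int) := by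
              rw [pv_count_append, if_neg (fun h => hxc h.symm)]
              omega
            rw [h1, hM]
        rw [hcongr]
      rw [hpick, hM, hcnt, hn]

theorem pvA_eq_pick (p : List Int) (hp : p ≠ []) : vote_cls_py p = pvPick p := by
  have hcounts : pvA_counts p = PySem.Dict.counter p :=
    PySem.Dict.foldl_insert_getD_add_one_eq_counter p
  -- values of the counter
  have hvals : (PySem.Dict.counter p).values
      = (PySem.Set.ofList p).map (fun k => (p.count k : Int)) := by
    show ((PySem.Dict.counter p).items).map (fun kv => kv.2) = _
    rw [PySem.Dict.items_counter, List.map_map]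
    rfl
  obtain ⟨a, t, hat⟩ := List.exists_cons_of_ne_nil hp
  have hane : a ∈ p := by rw [hat]; exact List.mem_cons_self
  have haof : a ∈ PySem.Set.ofList p := (PySem.Set.mem_ofList p a).mpr hane
  have hvne : (PySem.Dict.counter p).values ≠ [] := by
    rw [hvals]
    intro h
    have : (p.count a : Int) ∈ (PySem.Set.ofList p).map (fun k => (p.count k : Int)) :=
      List.mem_map.mpr ⟨a, haof, rfl⟩
    rw [h] at this
    exact absurd this (List.not_mem_nil)
  -- the Python max of the values is pvMaxCnt p
  obtain ⟨m, hm⟩ : ∃ m, PySem.List.max? (PySem.Dict.counter p).values (fun v => v) = some m := by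
    cases hmx : PySem.List.max? (PySem.Dict.counter p).values (fun v => v) with
    | none => exact absurd ((PySem.List.max?_eq_none_iff _ _).mp hmx) hvne
    | some m => exact ⟨m, rfl⟩
  have hmM : m = pvMaxCnt p := by
    have hmem := PySem.List.max?_mem hm
    rw [hvals, List.mem_map] at hmem
    obtain ⟨k, hk, he⟩ := hmem
    have hkp : k ∈ p := (PySem.Set.mem_ofList p k).mp hk
    have h1 : m ≤ pvMaxCnt p := by rw [← he]; exact pvMaxCnt_ge p hkp
    obtain ⟨x, hx, he2⟩ := pvMaxCnt_mem p hp
    have hxv : pvMaxCnt p ∈ (PySem.Dict.counter p).values := by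
      rw [hvals]
      exact List.mem_map.mpr ⟨x, (PySem.Set.mem_ofList p x).mpr hx, he2⟩
    have h2 := PySem.List.max?_isMax hm (pvMaxCnt p) hxv
    omega
  have hmax : pvA_max_cnt p = pvMaxCnt p := by
    unfold pvA_max_cnt
    rw [hcounts, hm]
    exact hmM
  -- candidate membership = "count is maximal", on elements of p
  have hcand : ∀ x ∈ p.reverse,
      ((pvA_candidates p).contains x) = decide ((p.count x : Int) = pvMaxCnt p) := by
    intro x hx
    have hxp : x ∈ p := List.mem_reverse.mp hx
    unfold pvA_candidates
    rw [hcounts, hmax, PySem.Dict.items_counter]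
    rw [Bool.eq_iff_iff, List.contains_iff_mem, decide_eq_true_iff]
    constructor
    · intro h
      rw [List.mem_map] at h
      obtain ⟨kv, hkv, he⟩ := h
      rw [List.mem_filter] at hkv
      obtain ⟨hkv1, hkv2⟩ := hkv
      rw [List.mem_map] at hkv1
      obtain ⟨k, _, he2⟩ := hkv1
      subst he2
      simp at hkv2 he
      subst he
      exact hkv2
    · intro h
      apply List.mem_map.mpr
      refine ⟨(x, (p.count x : Int)), ?_, rfl⟩
      rw [List.mem_filter]
      constructor
      · exact List.mem_map.mpr ⟨x, (PySem.Set.mem_ofList p x).mpr hxp, rfl⟩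
      · simpa using h
  -- the find? succeeds, so both sides are its value
  unfold vote_cls_py
  rw [if_neg hp, pv_find?_congr_mem hcand]
  obtain ⟨x, hx, he⟩ := pvMaxCnt_mem p hp
  have hsome : (p.reverse.find? (fun c => decide ((p.count c : Int) = pvMaxCnt p))).isSome := by
    rw [List.find?_isSome]
    exact ⟨x, List.mem_reverse.mpr hx, by simpa using he⟩
  cases hf : p.reverse.find? (fun c => decide ((p.count c : Int) = pvMaxCnt p)) with
  | none => rw [hf] at hsome; simp at hsome
  | some r => unfold pvPick; rw [hf]; rfl

-- ===== VERDICT (by name: the statement is the Claim_ definition above) =====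
theorem vote_cls_py_spec : Claim_equal_vote_cls_py := by
  intro hist _
  unfold Spec_vote_cls_py
  by_cases h : hist = []
  · subst h; rfl
  · have hB : vote_cls_py_alt hist = pvPick hist := by
      unfold vote_cls_py_alt; rw [pvB_state]
    rw [hB, pvA_eq_pick hist h]
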